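-- pv_equiv track=rewrite | github.com/mickrideout/anki-review-graphs | anki_review_graphs/metrics/MetricBase.py | _getCardDict
-- ===== SOURCE A (Python) =====
-- def _getCardDict(reviewStats):
--     cardDict = {}
--     for review in reviewStats:
--         cardId = review[1]
--         if cardId in cardDict:
--             cardDict[cardId].append(review)
--         else:
--             cardDict[cardId] = [review]
--     for cardId in cardDict:
--         cardDict[cardId] = sorted(cardDict[cardId], key=lambda x: x[0])
--     return cardDict
-- ===== SOURCE B (Python) =====
-- def _getCardDict(reviewStats):
--     cardDict = {cardId: [] for _, cardId in reviewStats}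
--     for review in sorted(reviewStats, key=lambda x: x[0]):
--         cardDict[review[1]].append(review)
--     return cardDict
-- ===== Notes on version B (the rewrite author's own statement) =====
-- stated objective: alternative
-- what changed: A groups reviews by cardId and then re-sorts every bucket separately; B pre-seeds the keys, stably sorts the whole list by time once, and fills all buckets in a single grouping pass (no per-bucket sort).
import Mathlib
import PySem

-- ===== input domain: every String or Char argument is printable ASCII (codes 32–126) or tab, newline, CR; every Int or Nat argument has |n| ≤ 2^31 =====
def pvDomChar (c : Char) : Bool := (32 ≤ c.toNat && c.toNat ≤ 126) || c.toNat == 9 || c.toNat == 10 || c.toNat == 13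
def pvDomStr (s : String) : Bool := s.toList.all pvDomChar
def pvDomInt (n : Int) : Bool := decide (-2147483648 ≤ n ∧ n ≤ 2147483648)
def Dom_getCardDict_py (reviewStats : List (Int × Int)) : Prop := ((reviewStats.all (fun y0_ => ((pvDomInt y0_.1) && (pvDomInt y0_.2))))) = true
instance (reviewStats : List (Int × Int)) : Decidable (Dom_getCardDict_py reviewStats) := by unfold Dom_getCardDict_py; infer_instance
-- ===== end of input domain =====

-- B replaces A's group-then-sort-each-bucket by one global stable sort followed by a single
-- grouping pass (key order pre-seeded in first-appearance order, as a Python dict has).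

-- ===== PORT A =====
def getCardDict_py (reviewStats : List (Int × Int)) : List (Int × List (Int × Int)) :=
  let d1 := reviewStats.foldl (fun d review =>
    let cardId := review.2
    if d.contains cardId then d.modify cardId [] (fun v => v ++ [review])
    else d.insert cardId [review]) PySem.Dict.empty
  let d2 := d1.keys.foldl (fun d cardId =>
    d.insert cardId (PySem.List.sorted (d.getD cardId []) (fun x => x.1))) d1
  d2.items

-- ===== PORT B =====
def getCardDict_py_alt (reviewStats : List (Int × Int)) : List (Int × List (Int × Int)) :=
  let cardDict := reviewStats.foldl (fun d r => d.insert r.2 ([] : List (Int × Int))) PySem.Dict.empty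
  let result := (PySem.List.sorted reviewStats (fun x => x.1)).foldl
    (fun d review => d.modify review.2 [] (fun v => v ++ [review])) cardDict
  result.items

-- ===== PRECONDITION & SPEC =====
def Spec_getCardDict_py (reviewStats : List (Int × Int)) (out : List (Int × List (Int × Int))) : Prop := out = getCardDict_py_alt reviewStats
instance (reviewStats : List (Int × Int)) (out : List (Int × List (Int × Int))) : Decidable (Spec_getCardDict_py reviewStats out) := by unfold Spec_getCardDict_py; infer_instance

-- ===== CLAIM (what is proved, stated in full; the proofs are below) =====
def Claim_equal_getCardDict_py : Prop := ∀ (reviewStats : List (Int × Int)), Dom_getCardDict_py reviewStats → Spec_getCardDict_py reviewStats (getCardDict_py reviewStats)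

-- ===== LEMMAS AND PROOFS =====

-- s.update(xs) is s when every element of xs is already in s
lemma set_update_of_subset (s : PySem.Set Int) (xs : List Int) (h : ∀ x ∈ xs, x ∈ s) :
    PySem.Set.update s xs = s := by
  rw [PySem.Set.update_eq_append_filter]
  have hnil : List.filter (fun y => !s.contains y) (PySem.Set.ofList xs) = [] :=
    List.filter_eq_nil_iff.2 (fun y hy => by
      simpa using h y ((PySem.Set.mem_ofList xs y).1 hy))
  rw [hnil, List.append_nil]

-- inserting x before the first larger element; if everything is larger, x goes in front
lemma insertBy_all_before (bf : (Int × Int) → (Int × Int) → Bool) (x : Int × Int)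
    (zs : List (Int × Int)) (h : ∀ z ∈ zs, bf x z = true) :
    PySem.List.insertBy bf x zs = x :: zs := by
  cases zs with
  | nil => rfl
  | cons z zs => simp [PySem.List.insertBy, h z (by simp)]

-- filtering commutes with a single stable insertion into an already key-sorted list
lemma filter_insertBy (p : (Int × Int) → Bool) (x : Int × Int) (ys : List (Int × Int))
    (hys : ys.Pairwise (fun a b => a.1 ≤ b.1)) :
    (PySem.List.insertBy (fun a b => decide (a.1 < b.1)) x ys).filter p
      = if p x then PySem.List.insertBy (fun a b => decide (a.1 < b.1)) x (ys.filter p)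
        else ys.filter p := by
  induction ys with
  | nil =>
    by_cases hpx : p x = true <;> simp [PySem.List.insertBy, List.filter, hpx]
  | cons y ys ih =>
    rcases List.pairwise_cons.1 hys with ⟨hy, hys'⟩
    have IH := ih hys'
    by_cases hlt : x.1 < y.1
    · by_cases hpy : p y = true
      · by_cases hpx : p x = true <;>
          simp [PySem.List.insertBy, hlt, hpy, hpx]
      · have hall : ∀ z ∈ ys.filter p, (fun (a b : Int × Int) => decide (a.1 < b.1)) x z = true := by
          intro z hz
          have := hy z (List.mem_of_mem_filter hz)
          simp; omega
        have hIA := insertBy_all_before (fun a b => decide (a.1 < b.1)) x (ys.filter p) hall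
        by_cases hpx : p x = true <;>
          simp [PySem.List.insertBy, hlt, hpy, hpx, hIA]
    · by_cases hpy : p y = true
      · by_cases hpx : p x = true <;>
          simp [PySem.List.insertBy, hlt, hpy, hpx, IH]
      · by_cases hpx : p x = true <;>
          simp [PySem.List.insertBy, hlt, hpy, hpx, IH]

-- the stable sort of a filtered list is the filtered stable sort
lemma sorted_append_singleton (l : List (Int × Int)) (x : Int × Int) :
    PySem.List.sorted (l ++ [x]) (fun x => x.1)
      = PySem.List.insertBy (fun a b => decide (a.1 < b.1)) x (PySem.List.sorted l (fun x => x.1)) := by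
  rw [PySem.List.sorted_eq_foldl_insertBy, List.foldl_append]
  simp only [List.foldl_cons, List.foldl_nil]
  rw [← PySem.List.sorted_eq_foldl_insertBy]

lemma sorted_filter_comm (p : (Int × Int) → Bool) (rs : List (Int × Int)) :
    PySem.List.sorted (rs.filter p) (fun x => x.1)
      = (PySem.List.sorted rs (fun x => x.1)).filter p := by
  induction rs using List.reverseRecOn with
  | nil => simp [PySem.List.sorted]
  | append_singleton xs x ih =>
    rw [List.filter_append]
    have hpw := PySem.List.sorted_pairwise (xs := xs) (key := fun x : Int × Int => x.1)
    by_cases hpx : p x = true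
    · rw [show List.filter p [x] = [x] from by simp [hpx]]
      rw [sorted_append_singleton, sorted_append_singleton, ih,
          filter_insertBy p x _ hpw, if_pos hpx]
    · rw [show List.filter p [x] = [] from by simp [hpx]]
      rw [List.append_nil, sorted_append_singleton, ih,
          filter_insertBy p x _ hpw, if_neg (by simpa using hpx)]

-- A's first loop is a plain modify-append loop
lemma phase1_eq (rs : List (Int × Int)) (d : PySem.Dict Int (List (Int × Int))) :
    rs.foldl (fun d review =>
      let cardId := review.2
      if d.contains cardId then d.modify cardId [] (fun v => v ++ [review])
      else d.insert cardId [review]) d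
    = rs.foldl (fun d review => d.modify review.2 [] (fun v => v ++ [review])) d := by
  apply PySem.List.foldl_congr_mem
  intro acc x _
  by_cases h : acc.contains x.2 = true
  · simp [h]
  · have h' : acc.contains x.2 = false := by simpa using h
    simp only [h', Bool.false_eq_true, if_false]
    simp [PySem.Dict.modify, PySem.Dict.getD_of_not_contains acc [] h']

-- value of a modify-append loop (pairs keyed by their second component)
lemma getD_modify_append_snd (l : List (Int × Int)) (d : PySem.Dict Int (List (Int × Int))) (c : Int) :
    (l.foldl (fun d review => d.modify review.2 [] (fun v => v ++ [review])) d).getD c []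
      = d.getD c [] ++ l.filter (fun r => r.2 == c) := by
  have h := PySem.Dict.getD_foldl_modify_append (l := l.map (fun r => (r.2, r))) (d := d) (c := c)
  rw [List.foldl_map] at h
  rw [h, List.filter_map]
  simp [Function.comp_def]

-- A's second loop: each present key's value gets sorted, nothing else moves
lemma phase2_getD (K : List Int) (hK : K.Nodup) (d : PySem.Dict Int (List (Int × Int))) (c : Int) :
    (K.foldl (fun d cardId =>
        d.insert cardId (PySem.List.sorted (d.getD cardId []) (fun x => x.1))) d).getD c []
      = if c ∈ K then PySem.List.sorted (d.getD c []) (fun x => x.1) else d.getD c [] := by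
  induction K generalizing d with
  | nil => simp
  | cons k K ih =>
    rcases List.nodup_cons.1 hK with ⟨hk, hK'⟩
    simp only [List.foldl_cons]
    rw [ih hK']
    by_cases hc : c = k
    · subst hc
      simp [hk, PySem.Dict.getD_insert_self]
    · rw [PySem.Dict.getD_insert_of_ne _ _ _ hc]
      by_cases hmem : c ∈ K <;> simp [hmem, hc]

-- a loop that only inserts [] leaves every getD _ [] equal to []
lemma getD_insert_nil_fold (l : List (Int × Int)) (d : PySem.Dict Int (List (Int × Int))) (c : Int)
    (h : d.getD c [] = []) :
    (l.foldl (fun d r => d.insert r.2 ([] : List (Int × Int))) d).getD c [] = [] := by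
  induction l generalizing d with
  | nil => exact h
  | cons r l ih =>
    simp only [List.foldl_cons]
    apply ih
    by_cases hc : c = r.2
    · subst hc; simp [PySem.Dict.getD_insert_self]
    · rw [PySem.Dict.getD_insert_of_ne _ _ _ hc]; exact h

-- ===== the two ports both compute K.map (fun k => (k, sorted (filter …))) =====
lemma getCardDict_py_items (rs : List (Int × Int)) :
    getCardDict_py rs
      = (PySem.Set.ofList (rs.map (fun r => r.2))).map
          (fun k => (k, PySem.List.sorted (rs.filter (fun r => r.2 == k)) (fun x => x.1))) := by
  unfold getCardDict_py
  simp only []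
  rw [phase1_eq]
  set d1 := rs.foldl (fun d review => d.modify review.2 [] (fun v => v ++ [review]))
      (PySem.Dict.empty : PySem.Dict Int (List (Int × Int))) with hd1
  have hkeys : d1.keys = PySem.Set.ofList (rs.map (fun r => r.2)) := by
    rw [hd1, PySem.Dict.keys_foldl_modify_key (key := fun r : Int × Int => r.2)
      (f := fun _ r v => v ++ [r])]
    simp [PySem.Set.update_nil_left]
  have hnd1 : d1.keys.Nodup := by rw [hkeys]; exact PySem.Set.nodup_ofList _
  set d2 := d1.keys.foldl (fun d cardId =>
      d.insert cardId (PySem.List.sorted (d.getD cardId []) (fun x => x.1))) d1 with hd2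
  have hkeys2 : d2.keys = d1.keys := by
    rw [hd2, PySem.Dict.keys_foldl_insert]
    exact set_update_of_subset _ _ (fun x hx => hx)
  have hnd2 : d2.keys.Nodup := hkeys2 ▸ hnd1
  rw [PySem.Dict.items_eq_map_keys d2 hnd2 []]
  rw [hkeys2, hkeys]
  apply List.map_congr_left
  intro k hk
  have : d2.getD k [] = PySem.List.sorted (d1.getD k []) (fun x => x.1) := by
    rw [hd2, phase2_getD _ hnd1 _ _, if_pos (hkeys ▸ hk)]
  rw [this, hd1, getD_modify_append_snd]
  simp

lemma getCardDict_py_alt_items (rs : List (Int × Int)) :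
    getCardDict_py_alt rs
      = (PySem.Set.ofList (rs.map (fun r => r.2))).map
          (fun k => (k, PySem.List.sorted (rs.filter (fun r => r.2 == k)) (fun x => x.1))) := by
  unfold getCardDict_py_alt
  simp only []
  set d0 := rs.foldl (fun d r => d.insert r.2 ([] : List (Int × Int)))
      (PySem.Dict.empty : PySem.Dict Int (List (Int × Int))) with hd0
  set ds := PySem.List.sorted rs (fun x : Int × Int => x.1) with hds
  set dB := ds.foldl (fun d review => d.modify review.2 [] (fun v => v ++ [review])) d0 with hdB
  have hkeys0 : d0.keys = PySem.Set.ofList (rs.map (fun r => r.2)) := by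
    rw [hd0, PySem.Dict.keys_foldl_insert_key (key := fun r : Int × Int => r.2)
      (f := fun _ _ => ([] : List (Int × Int)))]
    simp [PySem.Set.update_nil_left]
  have hkeysB : dB.keys = PySem.Set.ofList (rs.map (fun r => r.2)) := by
    rw [hdB, PySem.Dict.keys_foldl_modify_key (key := fun r : Int × Int => r.2)
      (f := fun _ r v => v ++ [r]), hkeys0]
    apply set_update_of_subset
    intro x hx
    rcases List.mem_map.1 hx with ⟨r, hr, hrx⟩
    exact (PySem.Set.mem_ofList _ _).2 (List.mem_map.2 ⟨r, (PySem.List.mem_sorted _ _ _ _).1 hr, hrx⟩)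
  have hndB : dB.keys.Nodup := hkeysB ▸ PySem.Set.nodup_ofList _
  rw [PySem.Dict.items_eq_map_keys dB hndB [], hkeysB]
  apply List.map_congr_left
  intro k hk
  have : dB.getD k [] = ds.filter (fun r => r.2 == k) := by
    rw [hdB, getD_modify_append_snd, hd0, getD_insert_nil_fold _ _ _ (by simp)]
    simp
  rw [this, hds, ← sorted_filter_comm]

-- ===== VERDICT (by name: the statement is the Claim_ definition above) =====
theorem getCardDict_py_spec : Claim_equal_getCardDict_py := by
  intro rs _
  unfold Spec_getCardDict_py
  rw [getCardDict_py_items, getCardDict_py_alt_items]
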